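-- pv_equiv track=rewrite | github.com/marin-community/marin | tests/evals/openai_stub.py | _tokenize_with_offsets
-- ===== SOURCE A (Python) =====
-- def _tokenize_with_offsets(text: str) -> tuple[list[str], list[int]]:
--     if not text:
--         return [], []
--     pieces = text.split(" ")
--     tokens = [pieces[0], *[f" {piece}" for piece in pieces[1:]]]
--     offsets: list[int] = []
--     offset = 0
--     for token in tokens:
--         offsets.append(offset)
--         offset += len(token)
--     return tokens, offsets
-- ===== SOURCE B (Python) =====
-- def _tokenize_with_offsets(text: str) -> tuple[list[str], list[int]]:
--     if not text:
--         return [], []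
--     tokens: list[str] = []
--     offsets: list[int] = [0]
--     cur: list[str] = []
--     for i, ch in enumerate(text):
--         if ch == " ":
--             tokens.append("".join(cur))
--             offsets.append(i)
--             cur = [" "]
--         else:
--             cur.append(ch)
--     tokens.append("".join(cur))
--     return tokens, offsets
-- ===== Notes on version B (the rewrite author's own statement) =====
-- stated objective: alternative
-- what changed: B replaces split-then-sum-of-token-lengths with a single character scan that builds each token incrementally and records an offset at position 0 and at every space character, never calling split or accumulating lengths.
import Mathlib
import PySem

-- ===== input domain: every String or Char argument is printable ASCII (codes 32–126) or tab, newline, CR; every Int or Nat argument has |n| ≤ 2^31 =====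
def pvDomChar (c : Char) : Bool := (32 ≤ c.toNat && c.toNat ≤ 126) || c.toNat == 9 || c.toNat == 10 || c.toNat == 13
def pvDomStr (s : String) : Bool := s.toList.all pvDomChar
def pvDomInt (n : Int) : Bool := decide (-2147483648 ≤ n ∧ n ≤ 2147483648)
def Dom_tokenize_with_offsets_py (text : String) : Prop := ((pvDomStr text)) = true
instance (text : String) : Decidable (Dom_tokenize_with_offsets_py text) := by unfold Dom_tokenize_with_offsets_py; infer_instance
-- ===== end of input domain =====

-- B rebuilds the tokens/offsets in ONE character scan (offset recorded at 0 and at every space)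
-- instead of A's split(" ") plus a length-accumulating loop; same cost, different decomposition.

-- ===== PORT A =====
-- A's offsets-loop body: offsets.append(offset); offset += len(token)
def pvStepA (st : List Int × Int) (tok : List Char) : List Int × Int :=
  (st.1 ++ [st.2], st.2 + (tok.length : Int))

def tokenize_with_offsets_py (text : String) : List String × List Int :=
  if text = "" then ([], [])
  else
    -- pieces = text.split(" "): the separator " " is nonempty, so split never raises;
    -- PySem.Chars.splitOn is exactly the sep ≠ "" form of str.split
    let pieces : List (List Char) := PySem.Chars.splitOn text.toList [' ']
    -- tokens = [pieces[0], *[f" {piece}" for piece in pieces[1:]]]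
    let tokens : List (List Char) := pieces.headI :: pieces.tail.map (fun p => ' ' :: p)
    let st := tokens.foldl pvStepA ([], 0)
    (tokens.map String.mk, st.1)

-- ===== PORT B =====
-- B's loop body over (i, ch): on a space, close the current token, record offset i, restart with " ";
-- otherwise append ch to the current token
def pvStepB (st : List (List Char) × List Int × List Char) (ic : Int × Char) :
    List (List Char) × List Int × List Char :=
  if ic.2 = ' ' then (st.1 ++ [st.2.2], st.2.1 ++ [ic.1], [' '])
  else (st.1, st.2.1, st.2.2 ++ [ic.2])

def tokenize_with_offsets_py_alt (text : String) : List String × List Int :=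
  if text = "" then ([], [])
  else
    let st := (PySem.List.enumerate text.toList).foldl pvStepB ([], [0], [])
    ((st.1 ++ [st.2.2]).map String.mk, st.2.1)

-- ===== PRECONDITION & SPEC =====
def Spec_tokenize_with_offsets_py (text : String) (out : List String × List Int) : Prop := out = tokenize_with_offsets_py_alt text
instance (text : String) (out : List String × List Int) : Decidable (Spec_tokenize_with_offsets_py text out) := by unfold Spec_tokenize_with_offsets_py; infer_instance

-- ===== CLAIM (what is proved, stated in full; the proofs are below) =====
def Claim_equal_tokenize_with_offsets_py : Prop := ∀ (text : String), Dom_tokenize_with_offsets_py text → Spec_tokenize_with_offsets_py text (tokenize_with_offsets_py text)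

-- ===== LEMMAS AND PROOFS =====

-- simple structural version of splitOn on a single-char separator
def pvSp : List Char → List (List Char)
  | [] => [[]]
  | c :: rest => if c = ' ' then [] :: pvSp rest else (pvSp rest).modifyHead (c :: ·)

-- modify the last element (own definition, with the equations we need)
def pvModLast (f : List Char → List Char) : List (List Char) → List (List Char)
  | [] => []
  | [a] => [f a]
  | a :: b :: r => a :: pvModLast f (b :: r)

lemma pvSp_ne_nil (l : List Char) : pvSp l ≠ [] := by
  cases l with
  | nil => simp [pvSp]
  | cons c r =>
    simp only [pvSp]
    split
    · simp
    · cases h : pvSp r with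
      | nil => exact absurd h (pvSp_ne_nil r)
      | cons a t => simp [List.modifyHead]

lemma pvModLast_snoc (f : List Char → List Char) (xs : List (List Char)) (a : List Char) :
    pvModLast f (xs ++ [a]) = xs ++ [f a] := by
  induction xs with
  | nil => simp [pvModLast]
  | cons x t ih =>
    cases t with
    | nil => simp [pvModLast]
    | cons y s => simpa [pvModLast] using ih

lemma pvModLast_modifyHead (f g : List Char → List Char)
    (h : ∀ x, f (g x) = g (f x)) (S : List (List Char)) :
    (pvModLast g S).modifyHead f = pvModLast g (S.modifyHead f) := by
  match S with
  | [] => rfl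
  | [a] => simp [pvModLast, List.modifyHead, h a]
  | a :: b :: r => simp [pvModLast, List.modifyHead]

lemma pvSp_snoc (l : List Char) (c : Char) :
    pvSp (l ++ [c]) = if c = ' ' then pvSp l ++ [[]] else pvModLast (· ++ [c]) (pvSp l) := by
  induction l with
  | nil =>
    by_cases hc : c = ' ' <;> simp [pvSp, hc, pvModLast]
  | cons a t ih =>
    by_cases ha : a = ' '
    · subst ha
      simp only [List.cons_append, pvSp, ih]
      by_cases hc : c = ' '
      · simp [hc]
      · simp only [if_neg hc]
        obtain ⟨x, s, hx⟩ := List.exists_cons_of_ne_nil (pvSp_ne_nil t)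
        rw [hx]
        rfl
    · simp only [List.cons_append, pvSp, if_neg ha, ih]
      by_cases hc : c = ' '
      · simp only [if_pos hc]
        obtain ⟨x, s, hx⟩ := List.exists_cons_of_ne_nil (pvSp_ne_nil t)
        simp [hx, List.modifyHead]
      · simp only [if_neg hc]
        exact pvModLast_modifyHead (a :: ·) (· ++ [c]) (fun x => rfl) (pvSp t)

-- splitOn.go computed against pvSp
lemma pvGo_eq (fuel : Nat) (l cur : List Char) (acc : List (List Char))
    (h : l.length ≤ fuel) :
    PySem.Chars.splitOn.go [' '] fuel l cur acc
      = acc.reverse ++ (pvSp l).modifyHead (cur.reverse ++ ·) := by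
  induction fuel generalizing l cur acc with
  | zero =>
    interval_cases hl : l.length
    rw [List.length_eq_zero_iff] at hl
    subst hl
    simp [PySem.Chars.splitOn.go, pvSp, List.modifyHead]
  | succ f ih =>
    cases l with
    | nil => simp [PySem.Chars.splitOn.go, pvSp, List.modifyHead]
    | cons c rest =>
      simp only [List.length_cons, Nat.succ_le_succ_iff] at h
      by_cases hc : c = ' '
      · subst hc
        rw [show PySem.Chars.splitOn.go [' '] (f+1) (' ' :: rest) cur acc
              = PySem.Chars.splitOn.go [' '] f (List.drop 1 (' ' :: rest)) [] (cur.reverse :: acc) by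
            simp [PySem.Chars.splitOn.go, List.isPrefixOf]]
        rw [List.drop_one, List.tail_cons, ih rest [] (cur.reverse :: acc) h]
        simp only [pvSp]
        cases hs : pvSp rest with
        | nil => exact absurd hs (pvSp_ne_nil rest)
        | cons x s => simp [List.modifyHead]
      · have hc' : ¬ (' ' = c) := fun hh => hc hh.symm
        rw [show PySem.Chars.splitOn.go [' '] (f+1) (c :: rest) cur acc
              = PySem.Chars.splitOn.go [' '] f rest (c :: cur) acc by
            simp [PySem.Chars.splitOn.go, List.isPrefixOf, hc']]
        rw [ih rest (c :: cur) acc h]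
        simp only [pvSp, if_neg hc]
        cases hs : pvSp rest with
        | nil => exact absurd hs (pvSp_ne_nil rest)
        | cons x s => simp [List.modifyHead]

lemma pvSplitOn_eq (l : List Char) : PySem.Chars.splitOn l [' '] = pvSp l := by
  rw [PySem.Chars.splitOn, pvGo_eq _ _ _ _ (Nat.le_succ_of_le le_rfl)]
  cases h : pvSp l with
  | nil => exact absurd h (pvSp_ne_nil l)
  | cons x s => simp [List.modifyHead]

-- A's token list, as a function of the raw characters
def pvTok (l : List Char) : List (List Char) :=
  (pvSp l).headI :: (pvSp l).tail.map (' ' :: ·)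

def pvOffs (ts : List (List Char)) : List Int × Int := ts.foldl pvStepA ([], 0)

lemma pvOffs_snoc (ts : List (List Char)) (t : List Char) :
    pvOffs (ts ++ [t]) = ((pvOffs ts).1 ++ [(pvOffs ts).2], (pvOffs ts).2 + (t.length : Int)) := by
  simp [pvOffs, List.foldl_append, pvStepA]

lemma pvTok_snoc_space (l : List Char) : pvTok (l ++ [' ']) = pvTok l ++ [[' ']] := by
  have h := pvSp_snoc l ' '
  obtain ⟨x, s, hx⟩ := List.exists_cons_of_ne_nil (pvSp_ne_nil l)
  simp [pvTok, h, hx]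

lemma pvTok_snoc_char (l : List Char) (c : Char) (hc : c ≠ ' ') :
    pvTok (l ++ [c]) = pvModLast (· ++ [c]) (pvTok l) := by
  have h := pvSp_snoc l c
  rw [if_neg hc] at h
  match hs : pvSp l with
  | [] => exact absurd hs (pvSp_ne_nil l)
  | [a] => simp [pvTok, h, hs, pvModLast]
  | a :: b :: r =>
    simp only [pvTok, h, hs, pvModLast, List.headI, List.tail_cons, List.map_cons]
    congr 1
    clear h hs
    induction r generalizing b with
    | nil => simp [pvModLast]
    | cons y s ih => simpa [pvModLast] using ih y

-- the single-scan invariant: B's fold state carries A's tokens-but-last, A's offsets, and the open token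
lemma pvInvar (l : List Char) :
    ((PySem.List.enumerate l).foldl pvStepB ([], [0], [])).1
        ++ [((PySem.List.enumerate l).foldl pvStepB ([], [0], [])).2.2] = pvTok l
    ∧ ((PySem.List.enumerate l).foldl pvStepB ([], [0], [])).2.1 = (pvOffs (pvTok l)).1
    ∧ (pvOffs (pvTok l)).2 = (l.length : Int) := by
  induction l using List.reverseRecOn with
  | nil => refine ⟨rfl, ?_, rfl⟩; simp [pvTok, pvSp, pvOffs, pvStepA]
  | append_singleton l c ih =>
    obtain ⟨ih1, ih2, ih3⟩ := ih
    rw [PySem.List.enumerate_append]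
    simp only [List.foldl_append, PySem.List.enumerate, List.foldl_cons, List.foldl_nil]
    set s := (PySem.List.enumerate l).foldl pvStepB ([], [0], []) with hsdef
    by_cases hc : c = ' '
    · subst hc
      have hstep : pvStepB s (0 + (l.length : Int), ' ')
          = (s.1 ++ [s.2.2], s.2.1 ++ [0 + (l.length : Int)], [' ']) := rfl
      rw [hstep]
      refine ⟨?_, ?_, ?_⟩
      · rw [pvTok_snoc_space, ih1]
      · rw [pvTok_snoc_space, pvOffs_snoc, ih2, ih3]
        norm_num
      · rw [pvTok_snoc_space, pvOffs_snoc, ih3]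
        simp [List.length_append]
    · have hstep : pvStepB s (0 + (l.length : Int), c)
          = (s.1, s.2.1, s.2.2 ++ [c]) := by
        simp [pvStepB, hc]
      rw [hstep]
      rw [pvTok_snoc_char l c hc, ← ih1, pvModLast_snoc]
      have h1 : (pvOffs (s.1 ++ [s.2.2 ++ [c]])).1 = (pvOffs (s.1 ++ [s.2.2])).1 := by
        rw [pvOffs_snoc, pvOffs_snoc]
      have h2 : (pvOffs (s.1 ++ [s.2.2 ++ [c]])).2 = (pvOffs (s.1 ++ [s.2.2])).2 + 1 := by
        rw [pvOffs_snoc, pvOffs_snoc]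
        simp only [List.length_append, List.length_cons, List.length_nil]
        push_cast
        ring
      rw [ih1] at h1 h2
      refine ⟨rfl, by rw [h1, ih2], ?_⟩
      rw [h2, ih3]
      simp [List.length_append]

-- ===== VERDICT (by name: the statement is the Claim_ definition above) =====
theorem tokenize_with_offsets_py_spec : Claim_equal_tokenize_with_offsets_py := by
  intro text _
  unfold Spec_tokenize_with_offsets_py tokenize_with_offsets_py tokenize_with_offsets_py_alt
  by_cases h : text = ""
  · simp [h]
  · simp only [if_neg h]
    obtain ⟨h1, h2, h3⟩ := pvInvar text.toList
    rw [pvSplitOn_eq]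
    show ((pvTok text.toList).map String.mk, (pvOffs (pvTok text.toList)).1) = _
    rw [h1, h2]
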